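-- pv_equiv track=rewrite | github.com/the-ALAM/umls_kg | src/scoring/relevance.py | build_ancestor_map
-- ===== SOURCE A (Python) =====
-- from typing import Dict, Set, List, Tuple
--
-- def build_ancestor_map(
--     ancestors: List[Dict],
-- ) -> Dict[int, Set[int]]:
--     """
--     Build ancestor map from ancestor data.
--
--     Args:
--         ancestors: List of ancestor dictionaries
--
--     Returns:
--         Map from concept_id to set of ancestor IDs
--     """
--     ancestor_map = {}
--
--     for anc in ancestors:
--         descendant_id = anc["descendant_concept_id"]
--         ancestor_id = anc["ancestor_concept_id"]
--
--         if descendant_id not in ancestor_map: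
--             ancestor_map[descendant_id] = set()
--         ancestor_map[descendant_id].add(ancestor_id)
--
--     return ancestor_map
-- ===== SOURCE B (Python) =====
-- def build_ancestor_map(ancestors):
--     """Two-phase rewrite: extract (descendant, ancestor) pairs once, then build
--     each key's ancestor set with a per-key comprehension."""
--     pairs = [(anc["descendant_concept_id"], anc["ancestor_concept_id"]) for anc in ancestors]
--     result = {}
--     for d in dict.fromkeys(d for d, _ in pairs):
--         result[d] = {a for dd, a in pairs if dd == d}
--     return result
-- ===== Notes on version B (the rewrite author's own statement) =====
-- stated objective: alternative
-- what changed: A aggregates incrementally into a dict of sets in one pass; B first extracts the (descendant, ancestor) pair list, then for each distinct descendant builds its ancestor set by a per-key set comprehension over the pairs.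
import Mathlib
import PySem

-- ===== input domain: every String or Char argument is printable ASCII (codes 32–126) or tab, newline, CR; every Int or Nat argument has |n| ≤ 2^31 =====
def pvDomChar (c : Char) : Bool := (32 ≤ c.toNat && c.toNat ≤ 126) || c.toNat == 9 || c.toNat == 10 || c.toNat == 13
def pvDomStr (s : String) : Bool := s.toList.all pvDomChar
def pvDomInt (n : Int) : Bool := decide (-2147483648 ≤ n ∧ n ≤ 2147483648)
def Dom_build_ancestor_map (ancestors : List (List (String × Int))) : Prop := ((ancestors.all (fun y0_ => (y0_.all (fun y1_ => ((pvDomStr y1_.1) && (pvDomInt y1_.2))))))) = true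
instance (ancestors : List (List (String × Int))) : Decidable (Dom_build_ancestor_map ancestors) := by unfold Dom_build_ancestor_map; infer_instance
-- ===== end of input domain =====

-- B replaces A's one-pass incremental dict-of-sets aggregation by a two-phase pass:
-- extract the (descendant, ancestor) pair list, then build each distinct key's set
-- by a per-key comprehension (alternative decomposition, not faster).

-- ===== PORT A =====
-- A's loop: for each record, look up both keys (none = KeyError, excluded by Pre_),
-- create the empty set on first sight of the descendant, then add the ancestor id.
def pvBuildLoop (m : PySem.Dict Int (PySem.Set Int)) :
    List (List (String × Int)) → PySem.Dict Int (PySem.Set Int)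
  | [] => m
  | anc :: rest =>
      match (PySem.Dict.mk anc).get? "descendant_concept_id",
            (PySem.Dict.mk anc).get? "ancestor_concept_id" with
      | some d, some a =>
          let m1 := if m.contains d then m else m.insert d PySem.Set.empty
          pvBuildLoop (m1.modify d PySem.Set.empty (fun s => PySem.Set.add s a)) rest
      | _, _ => m   -- KeyError in Python; unreachable under Pre_

def build_ancestor_map (ancestors : List (List (String × Int))) : List (Int × List Int) :=
  (pvBuildLoop PySem.Dict.empty ancestors).items

-- ===== PORT B =====
-- B's comprehension [(anc[dk], anc[ak]) for anc in ancestors] (none = KeyError)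
def pvPairsOf : List (List (String × Int)) → Option (List (Int × Int))
  | [] => some []
  | anc :: rest =>
      match (PySem.Dict.mk anc).get? "descendant_concept_id",
            (PySem.Dict.mk anc).get? "ancestor_concept_id", pvPairsOf rest with
      | some d, some a, some ps => some ((d, a) :: ps)
      | _, _, _ => none   -- KeyError in Python; unreachable under Pre_

def build_ancestor_map_alt (ancestors : List (List (String × Int))) : List (Int × List Int) :=
  match pvPairsOf ancestors with
  | none => []   -- KeyError in Python; unreachable under Pre_
  | some pairs =>
      ((PySem.List.dedup (pairs.map Prod.fst)).foldl
        (fun r d =>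
          r.insert d (PySem.Set.ofList ((pairs.filter (fun p => p.1 == d)).map Prod.snd)))
        PySem.Dict.empty).items

-- ===== PRECONDITION & SPEC =====
-- Pre_ excludes exactly the inputs where A raises KeyError: a record missing one of the two keys.
def Pre_build_ancestor_map (ancestors : List (List (String × Int))) : Prop :=
  ∀ anc ∈ ancestors, "descendant_concept_id" ∈ anc.map Prod.fst ∧
                     "ancestor_concept_id" ∈ anc.map Prod.fst
instance (ancestors : List (List (String × Int))) : Decidable (Pre_build_ancestor_map ancestors) := by
  unfold Pre_build_ancestor_map; infer_instance

def pvWitness_build_ancestor_map : (List (List (String × Int))) :=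
  [[("descendant_concept_id", 1), ("ancestor_concept_id", 2)],
   [("descendant_concept_id", 1), ("ancestor_concept_id", 3)]]

def Spec_build_ancestor_map (ancestors : List (List (String × Int))) (out : List (Int × List Int)) : Prop := out = build_ancestor_map_alt ancestors
instance (ancestors : List (List (String × Int))) (out : List (Int × List Int)) : Decidable (Spec_build_ancestor_map ancestors out) := by unfold Spec_build_ancestor_map; infer_instance

-- ===== CLAIM (what is proved, stated in full; the proofs are below) =====
def Claim_equal_build_ancestor_map : Prop := ∀ (ancestors : List (List (String × Int))), Dom_build_ancestor_map ancestors → Pre_build_ancestor_map ancestors → Spec_build_ancestor_map ancestors (build_ancestor_map ancestors)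

-- ===== LEMMAS AND PROOFS =====

-- A's loop body over one pair
def pvStep (m : PySem.Dict Int (PySem.Set Int)) (p : Int × Int) : PySem.Dict Int (PySem.Set Int) :=
  (if m.contains p.1 then m else m.insert p.1 PySem.Set.empty).modify p.1 PySem.Set.empty
    (fun s => PySem.Set.add s p.2)

lemma pv_get?_isSome_of_mem (l : List (String × Int)) (k : String)
    (h : k ∈ l.map Prod.fst) : ∃ v, (PySem.Dict.mk l).get? k = some v := by
  induction l with
  | nil => simp at h
  | cons p rest ih =>
      rw [PySem.Dict.get?_mk_cons]
      by_cases hk : p.1 = k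
      · exact ⟨p.2, by simp [hk]⟩
      · have h' : k ∈ rest.map Prod.fst := by
          simp only [List.map_cons, List.mem_cons] at h
          exact h.resolve_left (fun e => hk e.symm)
        obtain ⟨v, hv⟩ := ih h'
        exact ⟨v, by simp [hk, hv]⟩

lemma pv_loop_eq_foldl (ancestors : List (List (String × Int)))
    (hpre : Pre_build_ancestor_map ancestors) :
    ∃ pairs, pvPairsOf ancestors = some pairs ∧
      ∀ m, pvBuildLoop m ancestors = pairs.foldl pvStep m := by
  induction ancestors with
  | nil => exact ⟨[], rfl, fun m => rfl⟩
  | cons anc rest ih =>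
      obtain ⟨hd, ha⟩ := hpre anc (by simp)
      obtain ⟨d, hdv⟩ := pv_get?_isSome_of_mem anc _ hd
      obtain ⟨a, hav⟩ := pv_get?_isSome_of_mem anc _ ha
      obtain ⟨ps, hps, hfold⟩ := ih (fun x hx => hpre x (List.mem_cons_of_mem _ hx))
      refine ⟨(d, a) :: ps, ?_, ?_⟩
      · simp [pvPairsOf, hdv, hav, hps]
      · intro m
        simp [pvBuildLoop, hdv, hav, hfold, List.foldl_cons, pvStep]

lemma pv_keys_step (m : PySem.Dict Int (PySem.Set Int)) (p : Int × Int) :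
    (pvStep m p).keys = PySem.Set.add m.keys p.1 := by
  unfold pvStep
  by_cases hc : m.contains p.1 = true
  · have hmem : p.1 ∈ m.keys := (PySem.Dict.contains_iff_mem_keys m p.1).mp hc
    rw [if_pos hc, PySem.Dict.keys_modify,
      PySem.Dict.keys_insert_of_contains _ _ hc, PySem.Set.add_of_mem hmem]
  · have hcf : m.contains p.1 = false := by simpa using hc
    have hmem : p.1 ∉ m.keys := fun h => hc ((PySem.Dict.contains_iff_mem_keys m p.1).mpr h)
    rw [if_neg hc, PySem.Dict.keys_modify,
      PySem.Dict.keys_insert_of_contains _ _ (by simp),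
      PySem.Dict.keys_insert_of_not_contains _ _ hcf, PySem.Set.add_of_not_mem hmem]

lemma pv_keys_foldl (pairs : List (Int × Int)) :
    ∀ m : PySem.Dict Int (PySem.Set Int),
      (pairs.foldl pvStep m).keys = PySem.Set.update m.keys (pairs.map Prod.fst) := by
  induction pairs with
  | nil => intro m; simp [PySem.Set.update]
  | cons p ps ih =>
      intro m
      rw [List.foldl_cons, ih, pv_keys_step, List.map_cons, PySem.Set.update_cons]

lemma pv_getD_step (m : PySem.Dict Int (PySem.Set Int)) (p : Int × Int) (k : Int) :
    (pvStep m p).getD k PySem.Set.empty =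
      if k = p.1 then PySem.Set.add (m.getD p.1 PySem.Set.empty) p.2
      else m.getD k PySem.Set.empty := by
  unfold pvStep
  rw [PySem.Dict.getD_modify]
  by_cases hc : m.contains p.1 = true
  · rw [if_pos hc]
  · have hcf : m.contains p.1 = false := by simpa using hc
    rw [if_neg hc]
    by_cases hk : k = p.1
    · rw [if_pos hk, if_pos hk, PySem.Dict.getD_insert, if_pos rfl,
        PySem.Dict.getD_of_not_contains m _ hcf]
    · rw [if_neg hk, if_neg hk, PySem.Dict.getD_insert, if_neg hk]

lemma pv_getD_foldl (pairs : List (Int × Int)) :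
    ∀ (m : PySem.Dict Int (PySem.Set Int)) (k : Int),
      (pairs.foldl pvStep m).getD k PySem.Set.empty =
        PySem.Set.update (m.getD k PySem.Set.empty)
          ((pairs.filter (fun p => p.1 == k)).map Prod.snd) := by
  induction pairs with
  | nil => intro m k; simp [PySem.Set.update]
  | cons p ps ih =>
      intro m k
      rw [List.foldl_cons, ih, pv_getD_step]
      by_cases hk : k = p.1
      · simp [hk, PySem.Set.update_cons]
      · have : (p.1 == k) = false := by simp; exact fun e => hk e.symm
        simp [this, hk]

theorem pv_main (ancestors : List (List (String × Int)))
    (hpre : Pre_build_ancestor_map ancestors) :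
    build_ancestor_map ancestors = build_ancestor_map_alt ancestors := by
  obtain ⟨pairs, hps, hfold⟩ := pv_loop_eq_foldl ancestors hpre
  have halt : build_ancestor_map_alt ancestors =
      ((PySem.List.dedup (pairs.map Prod.fst)).foldl
        (fun r d =>
          r.insert d (PySem.Set.ofList ((pairs.filter (fun p => p.1 == d)).map Prod.snd)))
        PySem.Dict.empty).items := by
    unfold build_ancestor_map_alt; rw [hps]
  unfold build_ancestor_map
  rw [halt, hfold]
  have hkeys : (pairs.foldl pvStep PySem.Dict.empty).keys
      = PySem.List.dedup (pairs.map Prod.fst) := by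
    rw [pv_keys_foldl, PySem.Dict.keys_empty, PySem.Set.update_nil_left,
      PySem.List.dedup_eq_ofList]
  have hnodup : (pairs.foldl pvStep PySem.Dict.empty).keys.Nodup := by
    rw [hkeys, PySem.List.dedup_eq_ofList]; exact PySem.Set.nodup_ofList _
  have hB := PySem.Dict.items_foldl_insert_fresh
      (l := PySem.List.dedup (pairs.map Prod.fst)) (k := fun d => d)
      (v := fun d => PySem.Set.ofList ((pairs.filter (fun p => p.1 == d)).map Prod.snd))
      (d := PySem.Dict.empty)
      (fun a _ => PySem.Dict.contains_empty a)
      (by simp only [List.map_id']; exact PySem.List.nodup_dedup _)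
  rw [PySem.Dict.items_eq_map_keys _ hnodup PySem.Set.empty, hkeys, hB]
  simp only [show (PySem.Dict.empty : PySem.Dict Int (PySem.Set Int)).items = [] from rfl,
    List.nil_append]
  apply List.map_congr_left
  intro k _
  rw [pv_getD_foldl, PySem.Dict.getD_empty]
  simp [PySem.Set.update_nil_left, PySem.Set.empty]

-- ===== VERDICT (by name: the statement is the Claim_ definition above) =====
theorem build_ancestor_map_spec : Claim_equal_build_ancestor_map := by
  intro ancestors _ hpre
  unfold Spec_build_ancestor_map
  exact pv_main ancestors hpre
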